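-- pv_equiv track=rewrite | github.com/gkkary3/algorithm | 1st_week/07_문자열 뒤집기.py | count_min_flips
-- ===== SOURCE A (Python) =====
-- def count_min_flips(s):
--     # 첫 문자를 기준으로 초기 그룹 설정
--     count_0 = 0
--     count_1 = 0
--
--     if s[0] == '0':
--         count_0 += 1
--     else:
--         count_1 += 1
--
--     # 연속된 숫자가 바뀔 때마다 그룹 수 증가
--     for i in range(1, len(s)):
--         if s[i] != s[i - 1]:
--             if s[i] == '0':
--                 count_0 += 1
--             else:
--                 count_1 += 1
--
--     return min(count_0, count_1)
-- ===== SOURCE B (Python) =====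
-- def count_min_flips(s):
--     # Inclusion-exclusion on global tallies: a maximal run of a char contributes
--     # (length) occurrences and (length - 1) equal-adjacent pairs, so
--     # #runs = #chars - #equal-adjacent-pairs, both in total and restricted to '0'.
--     zeros = sum(c == '0' for c in s)
--     same = sum(a == b for a, b in zip(s, s[1:]))
--     zz = sum(a == b == '0' for a, b in zip(s, s[1:]))
--     zero_runs = zeros - zz
--     total_runs = len(s) - same
--     return min(zero_runs, total_runs - zero_runs)
-- ===== Notes on version B (the rewrite author's own statement) =====
-- stated objective: alternative
-- what changed: Instead of detecting run boundaries with a prev-comparison loop that conditionally bumps one of two group counters, B computes three global tallies (zeros, equal-adjacent pairs, equal-adjacent '0' pairs) and derives the run counts by inclusion-exclusion (#runs = #chars - #equal-adjacent-pairs), with no boundary detection at all.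
import Mathlib
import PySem

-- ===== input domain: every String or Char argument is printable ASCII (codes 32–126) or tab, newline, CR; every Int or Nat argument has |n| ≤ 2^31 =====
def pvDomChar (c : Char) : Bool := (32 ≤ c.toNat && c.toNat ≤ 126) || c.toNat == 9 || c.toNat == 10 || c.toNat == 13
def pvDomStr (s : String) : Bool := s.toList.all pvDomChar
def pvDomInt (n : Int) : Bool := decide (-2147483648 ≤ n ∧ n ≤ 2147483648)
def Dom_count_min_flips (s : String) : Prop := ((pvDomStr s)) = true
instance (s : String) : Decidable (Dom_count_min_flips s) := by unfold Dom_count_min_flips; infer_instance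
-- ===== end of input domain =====

-- B replaces A's run-boundary loop with two conditional counters by three global tallies
-- combined by inclusion-exclusion (#runs = #chars - #equal-adjacent-pairs); same cost,
-- a different algorithm. On "" A raises IndexError (excluded by Pre_).

-- ===== PORT A =====
def count_min_flips (s : String) : Int :=
  let cs := s.toList
  match PySem.List.pyGet? cs 0 with
  | none => 0  -- s[0] raises IndexError here; excluded by Pre_
  | some c =>
    -- count_0/count_1 initialised from the first character
    let init : Int × Int := if c = '0' then (1, 0) else (0, 1)
    -- for i in range(1, len(s)): … (indices 1 ≤ i are always in range, so pyGetD is exact)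
    let p := (PySem.List.pyRange 1 (PySem.List.len cs) 1).foldl
      (fun (p : Int × Int) i =>
        if PySem.List.pyGetD cs i ' ' ≠ PySem.List.pyGetD cs (i - 1) ' ' then
          if PySem.List.pyGetD cs i ' ' = '0' then (p.1 + 1, p.2) else (p.1, p.2 + 1)
        else p) init
    min p.1 p.2

-- ===== PORT B =====
def count_min_flips_alt (s : String) : Int :=
  let cs := s.toList
  -- zeros = sum(c == '0' for c in s)
  let zeros : Int := cs.foldl (fun a c => a + if c = '0' then 1 else 0) 0
  -- same = sum(a == b for a, b in zip(s, s[1:]))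
  let same : Int := (cs.zip cs.tail).foldl (fun a ab => a + if ab.1 = ab.2 then 1 else 0) 0
  -- zz = sum(a == b == '0' for a, b in zip(s, s[1:]))
  let zz : Int := (cs.zip cs.tail).foldl (fun a ab => a + if ab.1 = ab.2 ∧ ab.2 = '0' then 1 else 0) 0
  let zero_runs := zeros - zz
  let total_runs := PySem.List.len cs - same
  min zero_runs (total_runs - zero_runs)

-- ===== PRECONDITION & SPEC =====
-- Pre_ excludes exactly the empty string, on which A raises IndexError at s[0].
def Pre_count_min_flips (s : String) : Prop := s ≠ ""
instance (s : String) : Decidable (Pre_count_min_flips s) := by unfold Pre_count_min_flips; infer_instance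
def pvWitness_count_min_flips : String := "0011"

def Spec_count_min_flips (s : String) (out : Int) : Prop := out = count_min_flips_alt s
instance (s : String) (out : Int) : Decidable (Spec_count_min_flips s out) := by unfold Spec_count_min_flips; infer_instance

-- ===== CLAIM (what is proved, stated in full; the proofs are below) =====
def Claim_equal_count_min_flips : Prop := ∀ (s : String), Dom_count_min_flips s → Pre_count_min_flips s → Spec_count_min_flips s (count_min_flips s)

-- ===== LEMMAS AND PROOFS =====

-- A's loop body, abstracted to the (previous, current) character pair it inspects.
def pvPairStep (p : Int × Int) (ab : Char × Char) : Int × Int :=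
  if ab.2 ≠ ab.1 then
    if ab.2 = '0' then (p.1 + 1, p.2) else (p.1, p.2 + 1)
  else p

-- The first character of every maximal run of the tail (used only to characterise A's fold).
def pvHeads (pairs : List (Char × Char)) : List Char :=
  pairs.filterMap (fun ab => if ab.2 ≠ ab.1 then some ab.2 else none)

lemma pvGetD_at (pre : List Char) (x : Char) (rest : List Char) :
    PySem.List.pyGetD (pre ++ x :: rest) (pre.length : Int) ' ' = x := by
  rw [PySem.List.pyGetD_natCast]
  simp [List.getD_eq_getElem?_getD]

-- A's index loop over range(|pre|+1, len) equals the fold of pvPairStep over adjacent pairs.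
lemma pvLoopA (rest : List Char) : ∀ (pre : List Char) (x : Char) (p : Int × Int),
    (PySem.List.pyRange ((pre.length : Int) + 1) (PySem.List.len (pre ++ x :: rest)) 1).foldl
      (fun (p : Int × Int) i =>
        if PySem.List.pyGetD (pre ++ x :: rest) i ' ' ≠ PySem.List.pyGetD (pre ++ x :: rest) (i - 1) ' ' then
          if PySem.List.pyGetD (pre ++ x :: rest) i ' ' = '0' then (p.1 + 1, p.2) else (p.1, p.2 + 1)
        else p) p
    = ((x :: rest).zip rest).foldl pvPairStep p := by
  induction rest with
  | nil =>
    intro pre x p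
    rw [PySem.List.pyRange_one_eq_nil (by simp [PySem.List.len])]
    simp
  | cons y rest' ih =>
    intro pre x p
    have hlen : PySem.List.len (pre ++ x :: y :: rest') = (pre.length : Int) + 2 + rest'.length := by
      simp [PySem.List.len]; ring_nf
    rw [PySem.List.pyRange_one_cons (by rw [hlen]; omega)]
    rw [List.foldl_cons]
    have hy : PySem.List.pyGetD (pre ++ x :: y :: rest') ((pre.length : Int) + 1) ' ' = y := by
      have h := pvGetD_at (pre ++ [x]) y rest'
      simp only [List.append_assoc, List.cons_append, List.nil_append, List.length_append,
        List.length_cons, List.length_nil, Nat.cast_add, Nat.cast_one, Nat.cast_zero] at h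
      simpa [add_comm] using h
    have hx : PySem.List.pyGetD (pre ++ x :: y :: rest') ((pre.length : Int) + 1 - 1) ' ' = x := by
      rw [add_sub_cancel_right]
      exact pvGetD_at pre x (y :: rest')
    rw [hy, hx]
    have hrec := ih (pre ++ [x]) y (pvPairStep p (x, y))
    have hcs : (pre ++ [x]) ++ y :: rest' = pre ++ x :: y :: rest' := by simp
    have hstart : ((pre ++ [x]).length : Int) + 1 = (pre.length : Int) + 1 + 1 := by
      simp
    rw [hcs, hstart] at hrec
    rw [show ((x :: y :: rest').zip (y :: rest')) = (x, y) :: ((y :: rest').zip rest') from rfl,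
        List.foldl_cons]
    rw [← hrec]
    simp [pvPairStep]

-- pvLoopA with pre = [] (the statement A's port produces).
lemma pvLoopA0 (c : Char) (rest : List Char) (p : Int × Int) :
    (PySem.List.pyRange 1 (PySem.List.len (c :: rest)) 1).foldl
      (fun (p : Int × Int) i =>
        if PySem.List.pyGetD (c :: rest) i ' ' ≠ PySem.List.pyGetD (c :: rest) (i - 1) ' ' then
          if PySem.List.pyGetD (c :: rest) i ' ' = '0' then (p.1 + 1, p.2) else (p.1, p.2 + 1)
        else p) p
    = ((c :: rest).zip rest).foldl pvPairStep p := by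
  have h := pvLoopA rest [] c p
  have e : ((List.length ([] : List Char) : Int) + 1) = 1 := by simp
  rw [e] at h
  exact h

-- The pair fold computes (zero-run-heads added, other-run-heads added).
lemma pvPairsFold (pairs : List (Char × Char)) : ∀ (p : Int × Int),
    pairs.foldl pvPairStep p
    = (p.1 + ((pvHeads pairs).count '0' : Int),
       p.2 + (((pvHeads pairs).length - (pvHeads pairs).count '0' : Nat) : Int)) := by
  induction pairs with
  | nil => intro p; simp [pvHeads]
  | cons ab t ih =>
    intro p
    obtain ⟨a, b⟩ := ab
    by_cases hne : b = a
    · have hh : pvHeads ((a, b) :: t) = pvHeads t := by simp [pvHeads, hne]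
      rw [List.foldl_cons, ih, hh]
      simp [pvPairStep, hne]
    · have hh : pvHeads ((a, b) :: t) = b :: pvHeads t := by simp [pvHeads, hne]
      have hcle : (pvHeads t).count '0' ≤ (pvHeads t).length := List.count_le_length
      rw [List.foldl_cons, ih, hh]
      simp only [pvPairStep, ne_eq, hne, not_false_eq_true, if_true, List.count_cons]
      by_cases h0 : b = '0'
      · rw [if_pos h0]
        refine Prod.ext ?_ ?_
        · simp [h0]; ring
        · simp [h0]
      · rw [if_neg h0]
        refine Prod.ext ?_ ?_
        · simp [h0, beq_iff_eq]
        · simp only [beq_iff_eq, List.length_cons]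
          rw [if_neg h0]
          omega

-- B's counting folds compute countP, cast to Int.
lemma pvFoldSum {α : Type} (p : α → Prop) [DecidablePred p] (l : List α) : ∀ acc : Int,
    l.foldl (fun a x => a + if p x then (1 : Int) else 0) acc
    = acc + (l.countP (fun x => decide (p x)) : Int) := by
  induction l with
  | nil => intro acc; simp
  | cons x t ih =>
    intro acc
    rw [List.foldl_cons, ih, List.countP_cons]
    by_cases h : p x <;> simp [h] <;> omega

-- Each pair with a '0' on the right is either a run head or an equal-'0' pair.
lemma pvHeadsCount (l : List (Char × Char)) :
    (pvHeads l).count '0' + l.countP (fun ab => decide (ab.1 = ab.2) && decide (ab.2 = '0'))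
    = l.countP (fun ab => decide (ab.2 = '0')) := by
  induction l with
  | nil => simp [pvHeads]
  | cons ab t ih =>
    obtain ⟨a, b⟩ := ab
    rw [List.countP_cons, List.countP_cons]
    by_cases hne : b = a
    · subst hne
      have hh : pvHeads ((b, b) :: t) = pvHeads t := by simp [pvHeads]
      rw [hh]
      by_cases h0 : b = '0' <;> simp [h0] <;> omega
    · have hh : pvHeads ((a, b) :: t) = b :: pvHeads t := by simp [pvHeads, hne]
      have hne' : ¬ (a = b) := fun h => hne h.symm
      rw [hh, List.count_cons]
      by_cases h0 : b = '0'
      · subst h0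
        simp [hne']
        omega
      · simp [hne', h0]
        omega

-- Each pair is either unequal (a run head) or equal.
lemma pvHeadsLen (l : List (Char × Char)) :
    (pvHeads l).length + l.countP (fun ab => decide (ab.1 = ab.2)) = l.length := by
  induction l with
  | nil => simp [pvHeads]
  | cons ab t ih =>
    obtain ⟨a, b⟩ := ab
    rw [List.countP_cons]
    by_cases hne : b = a
    · have hh : pvHeads ((a, b) :: t) = pvHeads t := by simp [pvHeads, hne]
      rw [hh]
      simp [hne.symm]; omega
    · have hh : pvHeads ((a, b) :: t) = b :: pvHeads t := by simp [pvHeads, hne]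
      have hne' : ¬ (a = b) := fun h => hne h.symm
      rw [hh]
      simp [hne']; omega

-- The second components of (c :: rest).zip rest enumerate rest exactly.
lemma pvSndCount (c : Char) (rest : List Char) (p : Char → Bool) :
    ((c :: rest).zip rest).countP (fun ab => p ab.2) = rest.countP p := by
  have hm : ((c :: rest).zip rest).map Prod.snd = rest :=
    List.map_snd_zip (by simp)
  calc ((c :: rest).zip rest).countP (fun ab => p ab.2)
      = (((c :: rest).zip rest).map Prod.snd).countP p := by
        rw [List.countP_map]; rfl
    _ = rest.countP p := by rw [hm]

-- ===== VERDICT (by name: the statement is the Claim_ definition above) =====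
theorem count_min_flips_spec : Claim_equal_count_min_flips := by
  intro s _ hpre
  have hne : s.toList ≠ [] := fun h => hpre (by
    cases s with | _ l => cases l; simp_all)
  obtain ⟨c, rest, hcs⟩ := List.exists_cons_of_ne_nil hne
  simp only [Spec_count_min_flips, count_min_flips, count_min_flips_alt, hcs,
    PySem.List.pyGet?_zero_cons, List.tail_cons]
  rw [pvLoopA0, pvPairsFold,
      pvFoldSum (fun c => c = '0'), pvFoldSum (fun ab : Char × Char => ab.1 = ab.2),
      pvFoldSum (fun ab : Char × Char => ab.1 = ab.2 ∧ ab.2 = '0')]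
  simp only [Bool.decide_and]
  have h1 := pvHeadsCount ((c :: rest).zip rest)
  have h2 := pvHeadsLen ((c :: rest).zip rest)
  have h3 := pvSndCount c rest (fun x => decide (x = '0'))
  have h3' : ((c :: rest).zip rest).countP (fun ab => decide (ab.2 = '0'))
      = rest.countP (fun x => decide (x = '0')) := h3
  rw [h3'] at h1
  have hz : (c :: rest).countP (fun x => decide (x = '0'))
      = (if c = '0' then 1 else 0) + rest.countP (fun x => decide (x = '0')) := by
    rw [List.countP_cons]; by_cases h0 : c = '0' <;> simp [h0] <;> omega
  have hlen : ((c :: rest).zip rest).length = rest.length := by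
    simp [List.length_zip]
  rw [hlen] at h2
  have hcle : (pvHeads ((c :: rest).zip rest)).count '0'
      ≤ (pvHeads ((c :: rest).zip rest)).length := List.count_le_length
  simp only [PySem.List.len, hz, List.length_cons]
  by_cases h0 : c = '0'
  · subst h0
    norm_num
    congr 1 <;> omega
  · simp only [if_neg h0]
    congr 1 <;> omega
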